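-- pv_equiv track=rewrite | github.com/Gihoon-Kim-Git/PPDS24F-Daily-Code | week06/29/numberSolitaire.py | solution
-- ===== SOURCE A (Python) =====
-- def solution(A):
--     n = len(A)
--     dp = [0] * n    # 현재 칸에 도달할 수 있는 최적의 경로 (최대 점수) 저장
--     dp[0] = A[0]
--
--     for i in range(1, n):    # 칸
--         max_value = float('-inf')
--         for k in range(1,7):   # 주사위
--             if (i-k) >= 0:
--                 max_value = max(max_value, dp[i-k])
--         dp[i] = max_value + A[i]         # 현재 도착 칸의 값 + 기존 값 중 max
--
--     return dp[n-1]
-- ===== SOURCE B (Python) =====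
-- def solution(A):
--     # Monotonic-queue DP: q holds indices whose dp values strictly decrease
--     # front-to-back, so q[0] is always the argmax of dp over the 6-step window.
--     n = len(A)
--     dp = [0] * n
--     dp[0] = A[0]
--     q = [0]
--     for i in range(1, n):
--         while q[0] < i - 6:          # evict indices that fell out of the window
--             q.pop(0)
--         dp[i] = dp[q[0]] + A[i]
--         while q and dp[q[-1]] <= dp[i]:  # keep dp values strictly decreasing
--             q.pop()
--         q.append(i)
--     return dp[n - 1]
-- ===== Notes on version B (the rewrite author's own statement) =====
-- stated objective: faster
-- what changed: Replaces A's inner bounds-checked 6-way scan over the dp array at every cell by a monotonic queue of indices whose front always holds the argmax of the sliding window, maintained by front eviction of stale indices and back popping of dominated ones; the per-cell inner loop disappears (each index is pushed and popped at most once).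
import Mathlib
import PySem

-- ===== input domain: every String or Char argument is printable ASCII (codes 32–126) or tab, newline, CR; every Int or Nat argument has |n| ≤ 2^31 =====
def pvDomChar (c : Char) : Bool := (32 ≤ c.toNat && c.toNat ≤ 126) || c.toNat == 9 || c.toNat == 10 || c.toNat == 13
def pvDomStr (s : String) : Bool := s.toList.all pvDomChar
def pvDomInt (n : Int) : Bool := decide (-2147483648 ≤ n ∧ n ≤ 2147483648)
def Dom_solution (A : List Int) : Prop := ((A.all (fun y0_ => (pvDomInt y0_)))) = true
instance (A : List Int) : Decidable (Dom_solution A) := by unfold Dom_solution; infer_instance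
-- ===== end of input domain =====

-- B replaces A's inner 6-way scan by a monotonic queue of indices (front = argmax of the
-- window), a different data structure; return values proved equal on nonempty lists.

-- ===== PORT A =====
-- helper for Python's  max_value = max(max_value, dp[i-k])  where max_value starts
-- at float('-inf'):  -inf is modelled as `none` (always overwritten at k = 1, since i ≥ 1)
def pyMaxNegInf (mv : Option Int) (d : Int) : Option Int :=
  some (match mv with
        | none => d
        | some v => max v d)

-- pyGetD defaults are never taken under Pre_ (all indices are in range there)
def solution (A : List Int) : Int :=
  let n : Int := A.length
  let dp : List Int := List.replicate A.length 0
  let dp := dp.set 0 (PySem.List.pyGetD A 0 0)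
  let dp := (PySem.List.pyRange 1 n 1).foldl
    (fun dp i =>
      let maxv : Option Int := (PySem.List.pyRange 1 7 1).foldl
        (fun mv k =>
          if 0 ≤ i - k then pyMaxNegInf mv (PySem.List.pyGetD dp (i - k) 0)
          else mv) none
      dp.set i.toNat (maxv.getD 0 + PySem.List.pyGetD A i 0)) dp
  PySem.List.pyGetD dp (n - 1) 0

-- ===== PORT B =====
-- front eviction:  while q[0] < i - 6: q.pop(0)
-- (the loop never runs on an empty q in an actual execution — the window always contains
--  index i-1 — so the [] case, where Python's q[0] would raise, is unreachable)
def bEvict (i : Int) : List Int → List Int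
  | [] => []
  | x :: xs => if x < i - 6 then bEvict i xs else x :: xs

-- back popping, on the REVERSED queue:  while q and dp[q[-1]] <= v: q.pop()
def bPopBack (dp : List Int) (v : Int) : List Int → List Int
  | [] => []
  | x :: xs => if PySem.List.pyGetD dp x 0 ≤ v then bPopBack dp v xs else x :: xs

-- body of B's for-loop; state = (dp, q)
def bStep (A : List Int) (st : List Int × List Int) (i : Int) : List Int × List Int :=
  let q := bEvict i st.2
  let v := PySem.List.pyGetD st.1 (PySem.List.pyGetD q 0 0) 0 + PySem.List.pyGetD A i 0
  let dp := st.1.set i.toNat v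
  let q := (bPopBack dp v q.reverse).reverse ++ [i]
  (dp, q)

def solution_alt (A : List Int) : Int :=
  let n : Int := A.length
  let dp : List Int := List.replicate A.length 0
  let dp := dp.set 0 (PySem.List.pyGetD A 0 0)
  let st := (PySem.List.pyRange 1 n 1).foldl (bStep A) (dp, [0])
  PySem.List.pyGetD st.1 (n - 1) 0

-- ===== PRECONDITION & SPEC =====
-- Pre_ excludes only the empty list, on which both A and B raise IndexError.
def Pre_solution (A : List Int) : Prop := A ≠ []
instance (A : List Int) : Decidable (Pre_solution A) := by unfold Pre_solution; infer_instance
def pvWitness_solution : List Int := ([1, -2, 3])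

def Spec_solution (A : List Int) (out : Int) : Prop := out = solution_alt A
instance (A : List Int) (out : Int) : Decidable (Spec_solution A out) := by unfold Spec_solution; infer_instance

-- ===== CLAIM (what is proved, stated in full; the proofs are below) =====
def Claim_equal_solution : Prop := ∀ (A : List Int), Dom_solution A → Pre_solution A → Spec_solution A (solution A)

-- ===== LEMMAS AND PROOFS =====

@[simp] lemma pyMaxNegInf_none (d : Int) : pyMaxNegInf none d = some d := rfl
@[simp] lemma pyMaxNegInf_some (v d : Int) : pyMaxNegInf (some v) d = some (max v d) := rfl

-- reference recursion: reversed list of all dp values (most recent first)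
def pvMax : List Int → Int
  | [] => 0
  | x :: xs => xs.foldl max x

def pvStep (r : List Int) (a : Int) : List Int := (pvMax (r.take 6) + a) :: r

lemma pvFold_ne_nil (t : List Int) (r : List Int) (h : r ≠ []) :
    t.foldl pvStep r ≠ [] := by
  induction t generalizing r with
  | nil => exact h
  | cons a t ih => exact ih _ (by simp [pvStep])

lemma pvFold_length (t : List Int) (r : List Int) :
    (t.foldl pvStep r).length = r.length + t.length := by
  induction t generalizing r with
  | nil => simp
  | cons a t ih => simp [ih, pvStep]; omega

-- reading the reversed computed prefix: dp[L - k] is the k-th most recent value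
lemma read_rev' (r junk : List Int) (k : Int) (h1 : 1 ≤ k) (hk : k ≤ (r.length : Int)) :
    PySem.List.pyGetD (r.reverse ++ junk) ((r.length : Int) - k) 0
      = r.getD (k - 1).toNat 0 := by
  rw [PySem.List.pyGetD_eq_getElem _ _ (by omega) (by simp; omega)]
  have htn : ((r.length : Int) - k).toNat = r.length - k.toNat := by omega
  simp only [htn]
  rw [List.getElem_append_left (by simp; omega), List.getElem_reverse]
  rw [List.getD_eq_getElem r 0 (by omega)]
  congr 1
  simp
  omega

-- the inner dice loop over a list whose reads have been reduced to the reversed prefix r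
lemma inner_pure (r : List Int) (hr : r ≠ []) :
    List.foldl (fun (mv : Option Int) (k : Int) =>
        if 0 ≤ (r.length : Int) - k then pyMaxNegInf mv (r.getD (k - 1).toNat 0) else mv)
      none [1, 2, 3, 4, 5, 6] = some (pvMax (r.take 6)) := by
  rcases r with _ | ⟨a, r⟩; · exact absurd rfl hr
  rcases r with _ | ⟨b, r⟩
  · simp [List.foldl, pvMax]
  rcases r with _ | ⟨c, r⟩
  · simp [List.foldl, pvMax]
  rcases r with _ | ⟨d, r⟩
  · simp [List.foldl, pvMax]
  rcases r with _ | ⟨e, r⟩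
  · simp [List.foldl, pvMax]
  rcases r with _ | ⟨f, r⟩
  · simp [List.foldl, pvMax]
  · have hc : ∀ k : Int, 1 ≤ k → k ≤ 6 →
        (0 ≤ ((a :: b :: c :: d :: e :: f :: r).length : Int) - k) := by
      intro k _ _; simp; omega
    simp only [List.foldl, if_pos (hc 1 (by norm_num) (by norm_num)),
      if_pos (hc 2 (by norm_num) (by norm_num)), if_pos (hc 3 (by norm_num) (by norm_num)),
      if_pos (hc 4 (by norm_num) (by norm_num)), if_pos (hc 5 (by norm_num) (by norm_num)),
      if_pos (hc 6 (by norm_num) (by norm_num))]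
    simp [pvMax]

-- the inner dice loop computes the max of the six most recent dp values
lemma inner_max (r junk : List Int) (hr : r ≠ []) :
    List.foldl (fun (mv : Option Int) (k : Int) =>
        if 0 ≤ (r.length : Int) - k then
          pyMaxNegInf mv (PySem.List.pyGetD (r.reverse ++ junk) ((r.length : Int) - k) 0)
        else mv) none (PySem.List.pyRange 1 7 1) = some (pvMax (r.take 6)) := by
  have h17 : PySem.List.pyRange 1 7 1 = [1, 2, 3, 4, 5, 6] := by decide
  rw [h17, PySem.List.foldl_congr_mem _ _
    (fun (mv : Option Int) (k : Int) =>
        if 0 ≤ (r.length : Int) - k then pyMaxNegInf mv (r.getD (k - 1).toNat 0) else mv)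
    none ?_]
  · exact inner_pure r hr
  · intro acc x hx
    have hx1 : 1 ≤ x := by fin_cases hx <;> norm_num
    by_cases hcond : 0 ≤ (r.length : Int) - x
    · simp only [if_pos hcond]
      rw [read_rev' r junk x hx1 (by omega)]
    · simp only [if_neg hcond]

lemma a_fold (h : Int) (t : List Int) (m : Nat) (h1 : 1 ≤ m) (h2 : m ≤ t.length + 1) :
    (PySem.List.pyRange 1 (m : Int) 1).foldl
      (fun dp i =>
        let maxv : Option Int := (PySem.List.pyRange 1 7 1).foldl
          (fun mv k =>
            if 0 ≤ i - k then pyMaxNegInf mv (PySem.List.pyGetD dp (i - k) 0)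
            else mv) none
        dp.set i.toNat (maxv.getD 0 + PySem.List.pyGetD (h :: t) i 0))
      (h :: List.replicate t.length 0)
    = ((t.take (m - 1)).foldl pvStep [h]).reverse ++ List.replicate (t.length + 1 - m) 0 := by
  induction m, h1 using Nat.le_induction with
  | base =>
      rw [show ((1 : Nat) : Int) = (1 : Int) by simp]
      rw [PySem.List.pyRange_one_eq_nil le_rfl]
      simp
  | succ m hm ih =>
      have hm' : m ≤ t.length + 1 := by omega
      have hrange : PySem.List.pyRange 1 ((m + 1 : Nat) : Int) 1
          = PySem.List.pyRange 1 (m : Int) 1 ++ [(m : Int)] := by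
        push_cast
        exact PySem.List.pyRange_one_succ_right (by exact_mod_cast hm)
      rw [hrange, List.foldl_append, ih hm']
      have hRne : (t.take (m - 1)).foldl pvStep [h] ≠ [] := pvFold_ne_nil _ _ (by simp)
      have hRlen : ((t.take (m - 1)).foldl pvStep [h]).length = m := by
        rw [pvFold_length]; simp; omega
      simp only [List.foldl]
      rw [show ((m : Nat) : Int) = (((t.take (m - 1)).foldl pvStep [h]).length : Int) by
        rw [hRlen]]
      rw [inner_max _ _ hRne]
      rw [hRlen]
      have hmt : m - 1 < t.length := by omega
      have hreadA : PySem.List.pyGetD (h :: t) ((m : Nat) : Int) 0 = t.getD (m - 1) 0 := by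
        rw [PySem.List.pyGetD_of_nonneg _ _ (by positivity)]
        obtain ⟨m', rfl⟩ : ∃ m', m = m' + 1 := ⟨m - 1, by omega⟩
        simp
      rw [hreadA]
      have htake : t.take ((m + 1) - 1) = t.take (m - 1) ++ [t.getD (m - 1) 0] := by
        obtain ⟨m', rfl⟩ : ∃ m', m = m' + 1 := ⟨m - 1, by omega⟩
        simp only [Nat.add_sub_cancel]
        rw [List.take_add_one, List.getElem?_eq_getElem (by omega : m' < t.length),
            List.getD_eq_getElem t 0 (by omega : m' < t.length)]
        simp
      rw [htake, List.foldl_append]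
      simp only [List.foldl]
      have hsetlen : ((m : Nat) : Int).toNat = ((t.take (m - 1)).foldl pvStep [h]).reverse.length := by
        simp [hRlen]
      have hrepl : List.replicate (t.length + 1 - m) (0 : Int)
          = 0 :: List.replicate (t.length + 1 - (m + 1)) 0 := by
        rw [show t.length + 1 - m = (t.length + 1 - (m + 1)) + 1 by omega, List.replicate_succ]
      rw [hrepl, hsetlen, List.set_append_right _ _ (le_refl _)]
      simp [pvStep, List.reverse_cons]

--------------------------------------------------------------------------------
-- B-side machinery: the monotonic-queue invariant
--------------------------------------------------------------------------------

-- value of dp cell j, read off the reversed prefix R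
def pvVal (R : List Int) (j : Nat) : Int := R.getD (R.length - 1 - j) 0

-- queue order: indices increase, dp values strictly decrease
def pvRel (R : List Int) (a b : Int) : Prop := a < b ∧ pvVal R b.toNat < pvVal R a.toNat

def pvInv (R q : List Int) (i : Nat) : Prop :=
  q ≠ [] ∧ q.Pairwise (pvRel R) ∧ (∀ x ∈ q, 0 ≤ x ∧ x ≤ (i : Int)) ∧
  (∀ j : Nat, i ≤ j + 5 → j ≤ i →
    ∃ m ∈ q, (j : Int) ≤ m ∧ pvVal R j ≤ pvVal R m.toNat)

lemma pvVal_cons (c : Int) (R : List Int) (j : Nat) (hj : j < R.length) :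
    pvVal (c :: R) j = pvVal R j := by
  unfold pvVal
  have h1 : (c :: R).length - 1 - j = (R.length - 1 - j) + 1 := by simp; omega
  rw [h1]; rfl

lemma pvVal_top (c : Int) (R : List Int) : pvVal (c :: R) R.length = c := by
  unfold pvVal; simp

lemma foldl_max_le (l : List Int) (x y : Int) (h : y ≤ x) : y ≤ l.foldl max x := by
  induction l generalizing x with
  | nil => exact h
  | cons a l ih => exact ih _ (le_trans h (le_max_left _ _))

lemma mem_le_foldl_max (l : List Int) (x y : Int) (hy : y ∈ l) : y ≤ l.foldl max x := by
  induction l generalizing x with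
  | nil => simp at hy
  | cons a l ih =>
      rcases List.mem_cons.mp hy with rfl | hy
      · rw [List.foldl_cons]; exact foldl_max_le _ _ _ (le_max_right _ _)
      · rw [List.foldl_cons]; exact ih _ hy

lemma foldl_max_cases (l : List Int) (x : Int) : l.foldl max x = x ∨ l.foldl max x ∈ l := by
  induction l generalizing x with
  | nil => left; rfl
  | cons a l ih =>
      rcases ih (max x a) with h | h
      · rcases max_cases x a with ⟨he, _⟩ | ⟨he, _⟩
        · left; rw [List.foldl_cons, h, he]
        · right; rw [List.foldl_cons, h, he]; exact List.mem_cons_self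
      · right; exact List.mem_cons_of_mem _ h

lemma le_pvMax (l : List Int) (x : Int) (hx : x ∈ l) : x ≤ pvMax l := by
  rcases l with _ | ⟨a, l⟩
  · simp at hx
  · simp only [pvMax]
    rcases List.mem_cons.mp hx with rfl | hx
    · exact foldl_max_le _ _ _ le_rfl
    · exact mem_le_foldl_max _ _ _ hx

lemma pvMax_mem (l : List Int) (hl : l ≠ []) : pvMax l ∈ l := by
  rcases l with _ | ⟨a, l⟩
  · exact absurd rfl hl
  · simp only [pvMax]
    rcases foldl_max_cases l a with h | h
    · rw [h]; exact List.mem_cons_self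
    · exact List.mem_cons_of_mem _ h

lemma pvVal_eq_getElem (R : List Int) (j : Nat) (hj : j < R.length) :
    pvVal R j = R[R.length - 1 - j] := by
  unfold pvVal; exact List.getD_eq_getElem R 0 (by omega)

lemma val_mem_take6 (R : List Int) (j : Nat) (hj : j < R.length) (hw : R.length ≤ j + 6) :
    pvVal R j ∈ R.take 6 := by
  rw [pvVal_eq_getElem R j hj]
  have hp : R.length - 1 - j < (R.take 6).length := by simp; omega
  have : (R.take 6)[R.length - 1 - j] = R[R.length - 1 - j] := List.getElem_take
  rw [← this]
  exact List.getElem_mem hp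

lemma take6_val (R : List Int) (x : Int) (hx : x ∈ R.take 6) :
    ∃ j : Nat, j < R.length ∧ R.length ≤ j + 6 ∧ x = pvVal R j := by
  obtain ⟨p, hp, hpx⟩ := List.getElem_of_mem hx
  have hp6 : p < 6 ∧ p < R.length := by
    have := hp; simp at this; omega
  refine ⟨R.length - 1 - p, by omega, by omega, ?_⟩
  rw [pvVal_eq_getElem R _ (by omega)]
  have hidx : R.length - 1 - (R.length - 1 - p) = p := by omega
  simp only [hidx]
  rw [← hpx]
  exact List.getElem_take

-- bEvict is the front-eviction while-loop
lemma bEvict_sublist (i : Int) (q : List Int) : (bEvict i q).Sublist q := by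
  induction q with
  | nil => simp [bEvict]
  | cons x xs ih =>
      simp only [bEvict]
      split_ifs
      · exact ih.trans (List.sublist_cons_self _ _)
      · exact List.Sublist.refl _

lemma bEvict_mem_of (i : Int) (q : List Int) (x : Int) (hx : x ∈ q) (hge : i - 6 ≤ x) :
    x ∈ bEvict i q := by
  induction q with
  | nil => simp at hx
  | cons y ys ih =>
      simp only [bEvict]
      split_ifs with hy
      · rcases List.mem_cons.mp hx with rfl | hx
        · omega
        · exact ih hx
      · exact hx

lemma bEvict_head_ge (i : Int) (q : List Int) (f : Int) (t' : List Int)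
    (h : bEvict i q = f :: t') : i - 6 ≤ f := by
  induction q with
  | nil => simp [bEvict] at h
  | cons y ys ih =>
      simp only [bEvict] at h
      split_ifs at h with hy
      · exact ih h
      · cases h; omega

-- bPopBack with reads replaced by a pure value function
def popPure (g : Int → Int) (v : Int) : List Int → List Int
  | [] => []
  | x :: xs => if g x ≤ v then popPure g v xs else x :: xs

lemma bPopBack_eq_popPure (dp : List Int) (g : Int → Int) (v : Int) (l : List Int)
    (h : ∀ x ∈ l, PySem.List.pyGetD dp x 0 = g x) : bPopBack dp v l = popPure g v l := by
  induction l with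
  | nil => rfl
  | cons x xs ih =>
      simp only [bPopBack, popPure, h x List.mem_cons_self]
      split_ifs
      · exact ih (fun y hy => h y (List.mem_cons_of_mem _ hy))
      · rfl

lemma popPure_sublist (g : Int → Int) (v : Int) (l : List Int) : (popPure g v l).Sublist l := by
  induction l with
  | nil => simp [popPure]
  | cons x xs ih =>
      simp only [popPure]
      split_ifs
      · exact ih.trans (List.sublist_cons_self _ _)
      · exact List.Sublist.refl _

lemma popPure_mem_cases (g : Int → Int) (v : Int) (l : List Int) (x : Int) (hx : x ∈ l) :
    x ∈ popPure g v l ∨ g x ≤ v := by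
  induction l with
  | nil => simp at hx
  | cons y ys ih =>
      simp only [popPure]
      split_ifs with hy
      · rcases List.mem_cons.mp hx with rfl | hx
        · right; exact hy
        · exact ih hx
      · left; exact hx

lemma popPure_gt (g : Int → Int) (v : Int) (l : List Int)
    (hl : l.Pairwise (fun a b => g a < g b)) :
    ∀ x ∈ popPure g v l, v < g x := by
  induction l with
  | nil => simp [popPure]
  | cons y ys ih =>
      simp only [popPure]
      split_ifs with hy
      · exact ih (List.Pairwise.sublist (List.sublist_cons_self _ _) hl)
      · intro x hx
        rcases List.mem_cons.mp hx with rfl | hx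
        · omega
        · exact lt_of_lt_of_le (by omega) (le_of_lt ((List.pairwise_cons.mp hl).1 x hx))

-- reading a dp cell through the reversed prefix gives pvVal
lemma read_val (R junk : List Int) (x : Int) (hx0 : 0 ≤ x) (hx1 : x < (R.length : Int)) :
    PySem.List.pyGetD (R.reverse ++ junk) x 0 = pvVal R x.toNat := by
  have h := read_rev' R junk ((R.length : Int) - x) (by omega) (by omega)
  rw [show (R.length : Int) - ((R.length : Int) - x) = x from by ring] at h
  rw [h]
  unfold pvVal
  congr 1
  omega

-- eviction at step m: the head of the evicted queue carries the window maximum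
lemma evict_spec (R q : List Int) (m : Nat) (hm : 1 ≤ m) (hL : R.length = m)
    (hInv : pvInv R q (m - 1)) :
    ∃ f t', bEvict (m : Int) q = f :: t' ∧
      (f :: t').Pairwise (pvRel R) ∧
      (∀ x ∈ f :: t', 0 ≤ x ∧ x ≤ (m : Int) - 1) ∧
      pvVal R f.toNat = pvMax (R.take 6) ∧
      (∀ j : Nat, m ≤ j + 6 → j + 1 ≤ m →
        ∃ mm ∈ f :: t', (j : Int) ≤ mm ∧ pvVal R j ≤ pvVal R mm.toNat) := by
  obtain ⟨hne, hpw, hbd, hmax⟩ := hInv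
  -- q contains index m-1, which survives eviction: the result is nonempty
  obtain ⟨mm0, hmm0q, hmm0ge, -⟩ := hmax (m - 1) (by omega) le_rfl
  have hmm0le : mm0 ≤ ((m - 1 : Nat) : Int) := (hbd mm0 hmm0q).2
  have hmm0mem : mm0 ∈ bEvict (m : Int) q := bEvict_mem_of _ _ _ hmm0q (by omega)
  cases heq : bEvict (m : Int) q with
  | nil => rw [heq] at hmm0mem; simp at hmm0mem
  | cons f t' =>
    have hsub : (f :: t').Sublist q := heq ▸ bEvict_sublist (m : Int) q
    have hq1pw : (f :: t').Pairwise (pvRel R) := hpw.sublist hsub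
    have hq1bd : ∀ x ∈ f :: t', 0 ≤ x ∧ x ≤ (m : Int) - 1 := by
      intro x hx
      have := hbd x (hsub.mem hx)
      omega
    have hwin : ∀ j : Nat, m ≤ j + 6 → j + 1 ≤ m →
        ∃ mm ∈ f :: t', (j : Int) ≤ mm ∧ pvVal R j ≤ pvVal R mm.toNat := by
      intro j hj6 hj1
      obtain ⟨mm, hmmq, hmmge, hmmv⟩ := hmax j (by omega) (by omega)
      exact ⟨mm, heq ▸ bEvict_mem_of _ _ _ hmmq (by omega), hmmge, hmmv⟩
    refine ⟨f, t', rfl, hq1pw, hq1bd, ?_, hwin⟩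
    have hfbd := hq1bd f List.mem_cons_self
    have hfge : (m : Int) - 6 ≤ f := bEvict_head_ge _ _ _ _ heq
    have le1 : pvVal R f.toNat ≤ pvMax (R.take 6) :=
      le_pvMax _ _ (val_mem_take6 R f.toNat (by omega) (by omega))
    have le2 : pvMax (R.take 6) ≤ pvVal R f.toNat := by
      have htne : R.take 6 ≠ [] :=
        List.ne_nil_of_length_pos (by rw [List.length_take]; omega)
      obtain ⟨j, hj1, hj2, hjeq⟩ := take6_val R _ (pvMax_mem _ htne)
      obtain ⟨mm, hmmq, hmmge, hmmv⟩ := hwin j (by omega) (by omega)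
      have hvf : pvVal R mm.toNat ≤ pvVal R f.toNat := by
        rcases List.mem_cons.mp hmmq with rfl | hmm
        · exact le_rfl
        · exact le_of_lt ((List.pairwise_cons.mp hq1pw).1 mm hmm).2
      rw [hjeq]
      exact le_trans hmmv hvf
    exact le_antisymm le1 le2

-- one loop iteration of B preserves the invariant and advances the dp prefix by pvStep
lemma b_step_spec (h : Int) (t : List Int) (m : Nat) (hm1 : 1 ≤ m) (hm2 : m ≤ t.length)
    (q : List Int) (hInv : pvInv ((t.take (m - 1)).foldl pvStep [h]) q (m - 1)) :
    ∃ q', bStep (h :: t)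
        ((((t.take (m - 1)).foldl pvStep [h]).reverse ++ List.replicate (t.length + 1 - m) 0), q)
        (m : Int)
      = ((((t.take m).foldl pvStep [h]).reverse ++ List.replicate (t.length - m) 0), q')
      ∧ pvInv ((t.take m).foldl pvStep [h]) q' m := by
  set R : List Int := (t.take (m - 1)).foldl pvStep [h] with hRdef
  have hL : R.length = m := by
    rw [hRdef, pvFold_length]; rw [List.length_take]; simp; omega
  obtain ⟨f, t', heq, epw, ebd, eval, ewin⟩ := evict_spec R q m hm1 hL hInv
  have hfbd := ebd f List.mem_cons_self
  have hreadA : PySem.List.pyGetD (h :: t) ((m : Nat) : Int) 0 = t.getD (m - 1) 0 := by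
    rw [PySem.List.pyGetD_of_nonneg _ _ (by positivity)]
    obtain ⟨m', rfl⟩ : ∃ m', m = m' + 1 := ⟨m - 1, by omega⟩
    simp
  set a : Int := t.getD (m - 1) 0 with ha
  set v : Int := pvMax (R.take 6) + a with hv
  have hfread : PySem.List.pyGetD (R.reverse ++ List.replicate (t.length + 1 - m) 0) f 0
      = pvVal R f.toNat := read_val _ _ _ hfbd.1 (by rw [hL]; omega)
  have htake : t.take m = t.take (m - 1) ++ [a] := by
    obtain ⟨m', rfl⟩ : ∃ m', m = m' + 1 := ⟨m - 1, by omega⟩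
    simp only [Nat.add_sub_cancel]
    rw [List.take_add_one, List.getElem?_eq_getElem (by omega : m' < t.length)]
    simp only [Nat.add_sub_cancel, ha]
    rw [List.getD_eq_getElem t 0 (by omega : m' < t.length)]
    simp
  have hR' : (t.take m).foldl pvStep [h] = v :: R := by
    rw [htake, List.foldl_append, ← hRdef]
    simp [pvStep, hv]
  have hdp : (R.reverse ++ List.replicate (t.length + 1 - m) 0).set ((m : Nat) : Int).toNat v
      = (v :: R).reverse ++ List.replicate (t.length - m) 0 := by
    have hrepl : List.replicate (t.length + 1 - m) (0 : Int)
        = 0 :: List.replicate (t.length - m) 0 := by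
      rw [show t.length + 1 - m = (t.length - m) + 1 by omega, List.replicate_succ]
    have hsetlen : ((m : Nat) : Int).toNat = R.reverse.length := by simp [hL]
    rw [hrepl, hsetlen, List.set_append_right _ _ (le_refl _)]
    simp [List.reverse_cons]
  have hL' : (v :: R).length = m + 1 := by simp [hL]
  have hvtop : pvVal (v :: R) m = v := by have := pvVal_top v R; rwa [hL] at this
  have hvcons : ∀ x : Int, 0 ≤ x → x ≤ (m : Int) - 1 → pvVal (v :: R) x.toNat = pvVal R x.toNat :=
    fun x h0 h1 => pvVal_cons v R x.toNat (by omega)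
  have hpop : bPopBack ((v :: R).reverse ++ List.replicate (t.length - m) 0) v ((f :: t').reverse)
      = popPure (fun x => pvVal (v :: R) x.toNat) v ((f :: t').reverse) := by
    apply bPopBack_eq_popPure
    intro x hx
    have hxb := ebd x (List.mem_reverse.mp hx)
    exact read_val (v :: R) _ x hxb.1 (by rw [hL']; omega)
  have epw' : (f :: t').Pairwise (pvRel (v :: R)) := by
    refine List.Pairwise.imp_of_mem ?_ epw
    intro x y hx hy hxy
    have hbx := ebd x hx; have hby := ebd y hy
    exact ⟨hxy.1, by rw [hvcons x hbx.1 hbx.2, hvcons y hby.1 hby.2]; exact hxy.2⟩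
  have hrevpw : ((f :: t').reverse).Pairwise (fun x y => pvRel (v :: R) y x) :=
    List.pairwise_reverse.mpr epw'
  have hgt : ∀ x ∈ popPure (fun x => pvVal (v :: R) x.toNat) v ((f :: t').reverse),
      v < pvVal (v :: R) x.toNat :=
    popPure_gt _ _ _ (hrevpw.imp (fun hab => hab.2))
  have hKmem : ∀ x ∈ (popPure (fun x => pvVal (v :: R) x.toNat) v ((f :: t').reverse)).reverse,
      x ∈ f :: t' := by
    intro x hx
    exact List.mem_reverse.mp ((popPure_sublist _ _ _).mem (List.mem_reverse.mp hx))
  have hKpw : ((popPure (fun x => pvVal (v :: R) x.toNat) v ((f :: t').reverse)).reverse).Pairwise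
      (pvRel (v :: R)) := by
    rw [List.pairwise_reverse]
    exact List.Pairwise.sublist (popPure_sublist _ _ _) hrevpw
  refine ⟨(popPure (fun x => pvVal (v :: R) x.toNat) v ((f :: t').reverse)).reverse ++ [(m : Int)],
    ?_, ?_⟩
  · simp only [bStep]
    rw [heq, PySem.List.pyGetD_zero_cons, hfread, hreadA, eval, ← hv, hdp, hpop, hR']
  · rw [hR']
    refine ⟨by simp, ?_, ?_, ?_⟩
    · rw [List.pairwise_append]
      refine ⟨hKpw, List.pairwise_singleton _ _, ?_⟩
      intro x hx y hy
      simp only [List.mem_singleton] at hy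
      subst hy
      have hbx := ebd x (hKmem x hx)
      refine ⟨by omega, ?_⟩
      rw [show ((m : Int)).toNat = m by simp, hvtop]
      exact hgt x (List.mem_reverse.mp hx)
    · intro x hx
      rcases List.mem_append.mp hx with hx | hx
      · have := ebd x (hKmem x hx); omega
      · simp only [List.mem_singleton] at hx; subst hx; constructor <;> omega
    · intro j hj5 hjm
      by_cases hj : j = m
      · subst hj
        refine ⟨(j : Int), List.mem_append_right _ (by simp), le_rfl, ?_⟩
        rw [show ((j : Int)).toNat = j by simp]
      · have hjlt : j < m := lt_of_le_of_ne hjm hj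
        obtain ⟨mm, hmmq, hmmge, hmmv⟩ := ewin j (by omega) (by omega)
        have hmb := ebd mm hmmq
        have hjval : pvVal (v :: R) j = pvVal R j := pvVal_cons v R j (by omega)
        have hmval : pvVal (v :: R) mm.toNat = pvVal R mm.toNat := hvcons mm hmb.1 hmb.2
        rcases popPure_mem_cases (fun x => pvVal (v :: R) x.toNat) v ((f :: t').reverse) mm
            (List.mem_reverse.mpr hmmq) with hin | hle
        · exact ⟨mm, List.mem_append_left _ (List.mem_reverse.mpr hin), hmmge,
            by rw [hjval, hmval]; exact hmmv⟩
        · refine ⟨(m : Int), List.mem_append_right _ (by simp), by exact_mod_cast hjm, ?_⟩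
          rw [hjval, show ((m : Int)).toNat = m by simp, hvtop]
          calc pvVal R j ≤ pvVal R mm.toNat := hmmv
            _ = pvVal (v :: R) mm.toNat := hmval.symm
            _ ≤ v := hle

lemma b_fold (h : Int) (t : List Int) (m : Nat) (h1 : 1 ≤ m) (h2 : m ≤ t.length + 1) :
    ∃ q, (PySem.List.pyRange 1 (m : Int) 1).foldl (bStep (h :: t))
        (h :: List.replicate t.length 0, [0])
      = ((((t.take (m - 1)).foldl pvStep [h]).reverse ++ List.replicate (t.length + 1 - m) 0), q)
      ∧ pvInv ((t.take (m - 1)).foldl pvStep [h]) q (m - 1) := by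
  induction m, h1 using Nat.le_induction with
  | base =>
      refine ⟨[0], ?_, ?_⟩
      · rw [show ((1 : Nat) : Int) = (1 : Int) by simp]
        rw [PySem.List.pyRange_one_eq_nil le_rfl]
        simp
      · refine ⟨by simp, List.pairwise_singleton _ _, by simp, ?_⟩
        intro j _ hj
        interval_cases j
        exact ⟨0, by simp, by simp⟩
  | succ m hm ih =>
      obtain ⟨q, hfold, hinv⟩ := ih (by omega)
      have hrange : PySem.List.pyRange 1 ((m + 1 : Nat) : Int) 1
          = PySem.List.pyRange 1 (m : Int) 1 ++ [(m : Int)] := by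
        push_cast
        exact PySem.List.pyRange_one_succ_right (by exact_mod_cast hm)
      rw [hrange, List.foldl_append, hfold]
      simp only [List.foldl]
      obtain ⟨q', hstep, hinv'⟩ := b_step_spec h t m hm (by omega) q hinv
      have e2 : t.length + 1 - (m + 1) = t.length - m := by omega
      refine ⟨q', ?_, ?_⟩
      · simpa only [Nat.add_sub_cancel, e2] using hstep
      · simpa only [Nat.add_sub_cancel] using hinv'

theorem solution_spec : Claim_equal_solution := by
  intro A _ hpre
  obtain ⟨h, t, rfl⟩ := List.exists_cons_of_ne_nil hpre
  unfold Spec_solution solution solution_alt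
  have hinit : (List.replicate (h :: t).length (0 : Int)).set 0 (PySem.List.pyGetD (h :: t) 0 0)
      = h :: List.replicate t.length 0 := by
    have h0 : PySem.List.pyGetD (h :: t) 0 0 = h := by simp [pysem]
    simp [List.replicate_succ, h0]
  simp only [hinit]
  rw [show (((h :: t).length : Nat) : Int) = ((t.length + 1 : Nat) : Int) by simp]
  obtain ⟨q, hfold, _⟩ := b_fold h t (t.length + 1) (by omega) (by omega)
  rw [a_fold h t (t.length + 1) (by omega) (by omega), hfold]

-- ===== VERDICT (by name: the statement is the Claim_ definition above) =====
-- (solution_spec above)
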